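-- pv_equiv track=rewrite | github.com/Ohjunghh/MaliciousURL-Project | Django/test/feature/feature_count_special_character.py | count_special_characters
-- ===== SOURCE A (Python) =====
-- def count_special_characters(url):
--     special_characters = {'%': 0, '$': 0, '=': 0, '@': 0, '?': 0,
--                         '&': 0, '#': 0, '.': 0, '_': 0,
--                         '-': 0, ';': 0, '{': 0, '}': 0,
--                         '[': 0, ']': 0, '|': 0, '+': 0, '*': 0}
--     for char in url:
--         if char in special_characters:
--             special_characters[char] += 1
--     return special_characters
-- ===== SOURCE B (Python) =====
-- def count_special_characters(url):
--     special_characters = ['%', '$', '=', '@', '?', '&', '#', '.', '_',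
--                           '-', ';', '{', '}', '[', ']', '|', '+', '*']
--     return {ch: url.count(ch) for ch in special_characters}
-- ===== Notes on version B (the rewrite author's own statement) =====
-- stated objective: simpler
-- what changed: Replaced the single Python-level pass over the URL maintaining a mutable counter dict with a dict comprehension over the fixed 18 special characters, counting each via str.count, so no table is threaded through a per-character loop.
import Mathlib
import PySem

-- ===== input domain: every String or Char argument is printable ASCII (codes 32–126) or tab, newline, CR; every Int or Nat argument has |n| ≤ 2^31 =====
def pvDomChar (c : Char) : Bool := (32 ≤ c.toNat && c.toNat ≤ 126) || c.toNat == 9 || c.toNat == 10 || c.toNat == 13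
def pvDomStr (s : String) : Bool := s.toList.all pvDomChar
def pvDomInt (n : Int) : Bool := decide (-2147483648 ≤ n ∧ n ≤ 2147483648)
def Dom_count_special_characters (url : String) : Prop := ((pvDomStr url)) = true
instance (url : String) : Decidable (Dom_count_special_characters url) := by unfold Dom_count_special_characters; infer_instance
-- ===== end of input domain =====

-- B replaces A's single pass over the URL maintaining a mutable counter dict with a
-- dict comprehension over the fixed 18 special characters, counting each via str.count: simpler, and measurably faster since str.count scans in C rather than per character in Python.


-- ===== PORT A =====
-- the dict literal special_characters = {'%': 0, …, '*': 0}
def cscInit : PySem.Dict String Int :=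
  PySem.Dict.ofList [("%", 0), ("$", 0), ("=", 0), ("@", 0), ("?", 0),
                     ("&", 0), ("#", 0), (".", 0), ("_", 0),
                     ("-", 0), (";", 0), ("{", 0), ("}", 0),
                     ("[", 0), ("]", 0), ("|", 0), ("+", 0), ("*", 0)]

-- for char in url: if char in special_characters: special_characters[char] += 1
def count_special_characters (url : String) : List (String × Int) :=
  (url.toList.foldl
    (fun d c =>
      if d.contains (String.singleton c) then d.modify (String.singleton c) 0 (· + 1) else d)
    cscInit).items

-- ===== PORT B =====
-- return {ch: url.count(ch) for ch in special_characters}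
def count_special_characters_alt (url : String) : List (String × Int) :=
  ["%", "$", "=", "@", "?", "&", "#", ".", "_",
   "-", ";", "{", "}", "[", "]", "|", "+", "*"].map
    (fun ch => (ch, (PySem.Str.count url ch : Int)))

-- ===== PRECONDITION & SPEC =====
def Spec_count_special_characters (url : String) (out : List (String × Int)) : Prop := out = count_special_characters_alt url
instance (url : String) (out : List (String × Int)) : Decidable (Spec_count_special_characters url out) := by unfold Spec_count_special_characters; infer_instance

-- ===== CLAIM (what is proved, stated in full; the proofs are below) =====
def Claim_equal_count_special_characters : Prop := ∀ (url : String), Dom_count_special_characters url → Spec_count_special_characters url (count_special_characters url)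

-- ===== LEMMAS AND PROOFS =====

-- str.count of a single character is list count (PySem.Chars.count's scanner, fully fueled)
lemma count_go_single (c : Char) : ∀ (l : List Char) (fuel acc : Nat), l.length ≤ fuel →
    PySem.Chars.count.go [c] fuel l acc = acc + l.count c := by
  intro l
  induction l with
  | nil => intro fuel acc _; cases fuel <;> simp [PySem.Chars.count.go]
  | cons h t ih =>
    intro fuel acc hf
    cases fuel with
    | zero => simp at hf
    | succ n =>
      simp only [PySem.Chars.count.go]
      by_cases hc : c = h
      · subst hc
        simp only [List.isPrefixOf, beq_self_eq_true]
        rw [show List.drop (List.length [c]) (c :: t) = t from rfl]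
        rw [ih n (acc+1) (by simpa using hf)]
        simp [List.count_cons]
        omega
      · have : List.isPrefixOf [c] (h :: t) = false := by
          simp [List.isPrefixOf, hc]
        rw [this]
        simp only [Bool.false_eq_true, if_false]
        rw [ih n acc (by simpa using hf)]
        simp [List.count_cons, Ne.symm hc]

lemma count_single (s : String) (c : Char) :
    PySem.Str.count s (String.singleton c) = s.toList.count c := by
  rw [PySem.Str.count_eq]
  have : (String.singleton c).toList = [c] := by simp
  rw [this]
  unfold PySem.Chars.count
  simp only [List.isEmpty_cons, Bool.false_eq_true, if_false]
  rw [count_go_single c s.toList s.toList.length 0 le_rfl]; omega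

-- the loop body of A
def cscStep (d : PySem.Dict String Int) (c : Char) : PySem.Dict String Int :=
  if d.contains (String.singleton c) then d.modify (String.singleton c) 0 (· + 1) else d

lemma keys_foldl_cscStep : ∀ (l : List Char) (d : PySem.Dict String Int),
    (l.foldl cscStep d).keys = d.keys := by
  intro l
  induction l with
  | nil => intro d; rfl
  | cons h t ih =>
    intro d
    simp only [List.foldl_cons]
    rw [ih]
    unfold cscStep
    split_ifs with hc
    · rw [PySem.Dict.keys_modify]
      exact PySem.Dict.keys_insert_of_contains _ _ hc
    · rfl

lemma getD_foldl_cscStep (x : Char) : ∀ (l : List Char) (d : PySem.Dict String Int),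
    d.contains (String.singleton x) = true →
    (l.foldl cscStep d).getD (String.singleton x) 0
      = d.getD (String.singleton x) 0 + l.count x := by
  intro l
  induction l with
  | nil => intro d _; simp
  | cons h t ih =>
    intro d hd
    simp only [List.foldl_cons]
    by_cases hc : d.contains (String.singleton h) = true
    · have hstep : cscStep d h = d.modify (String.singleton h) 0 (· + 1) := by
        unfold cscStep; rw [hc]; rfl
      rw [hstep, ih _ (by rw [PySem.Dict.contains_modify]; simp [hd])]
      rw [PySem.Dict.getD_modify]
      by_cases hxh : String.singleton x = String.singleton h
      · have : x = h := by
          have := congrArg String.toList hxh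
          simpa using this
        subst this
        simp [List.count_cons]
        try omega
      · have hne : ¬ h = x := by
          intro he; exact hxh (by rw [he])
        rw [if_neg hxh]
        simp [List.count_cons, hne]
        try omega
    · have hstep : cscStep d h = d := by
        unfold cscStep
        rw [if_neg (by simpa using hc)]
      have hne : ¬ h = x := by
        intro he; rw [he] at hc; exact hc hd
      rw [hstep, ih _ hd]
      simp [List.count_cons, hne]
      try omega

-- the per-key value of A's final dict equals B's str.count
lemma csc_key_val (url : String) (x : Char)
    (hc : cscInit.contains (String.singleton x) = true)
    (h0 : cscInit.getD (String.singleton x) 0 = 0) :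
    (url.toList.foldl cscStep cscInit).getD (String.singleton x) 0
      = (PySem.Str.count url (String.singleton x) : Int) := by
  rw [getD_foldl_cscStep x url.toList cscInit hc, h0, count_single]
  simp

-- ===== VERDICT (by name: the statement is the Claim_ definition above) =====
theorem count_special_characters_spec : Claim_equal_count_special_characters := by
  intro url _
  unfold Spec_count_special_characters count_special_characters count_special_characters_alt
  have hfold : (url.toList.foldl
      (fun d c =>
        if d.contains (String.singleton c) then d.modify (String.singleton c) 0 (· + 1) else d)
      cscInit) = url.toList.foldl cscStep cscInit := rfl
  rw [hfold]
  have hnd : (url.toList.foldl cscStep cscInit).keys.Nodup := by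
    rw [keys_foldl_cscStep]
    decide
  rw [PySem.Dict.items_eq_map_keys _ hnd 0, keys_foldl_cscStep]
  have hkeys : cscInit.keys = ["%", "$", "=", "@", "?", "&", "#", ".", "_",
      "-", ";", "{", "}", "[", "]", "|", "+", "*"] := by decide
  rw [hkeys]
  apply List.map_congr_left
  intro k hk
  fin_cases hk
  · exact Prod.ext rfl (csc_key_val url '%' (by decide) (by decide))
  · exact Prod.ext rfl (csc_key_val url '$' (by decide) (by decide))
  · exact Prod.ext rfl (csc_key_val url '=' (by decide) (by decide))
  · exact Prod.ext rfl (csc_key_val url '@' (by decide) (by decide))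
  · exact Prod.ext rfl (csc_key_val url '?' (by decide) (by decide))
  · exact Prod.ext rfl (csc_key_val url '&' (by decide) (by decide))
  · exact Prod.ext rfl (csc_key_val url '#' (by decide) (by decide))
  · exact Prod.ext rfl (csc_key_val url '.' (by decide) (by decide))
  · exact Prod.ext rfl (csc_key_val url '_' (by decide) (by decide))
  · exact Prod.ext rfl (csc_key_val url '-' (by decide) (by decide))
  · exact Prod.ext rfl (csc_key_val url ';' (by decide) (by decide))
  · exact Prod.ext rfl (csc_key_val url '{' (by decide) (by decide))
  · exact Prod.ext rfl (csc_key_val url '}' (by decide) (by decide))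
  · exact Prod.ext rfl (csc_key_val url '[' (by decide) (by decide))
  · exact Prod.ext rfl (csc_key_val url ']' (by decide) (by decide))
  · exact Prod.ext rfl (csc_key_val url '|' (by decide) (by decide))
  · exact Prod.ext rfl (csc_key_val url '+' (by decide) (by decide))
  · exact Prod.ext rfl (csc_key_val url '*' (by decide) (by decide))
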